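-- pv_equiv track=rewrite | github.com/pypi-data/pypi-mirror-376 | packages/holobit-sdk/holobit_sdk-1.0.9.tar.gz/holobit_sdk-1.0.9/holobit_sdk/assembler/virtual_machine.py | _jump_to_endfunc
-- ===== SOURCE A (Python) =====
-- def _jump_to_endfunc(lines, start):
--     depth = 0
--     for i in range(start, len(lines)):
--         tokens = lines[i].strip().split()
--         if not tokens:
--             continue
--         cmd = tokens[0]
--         if cmd == "FUNC":
--             depth += 1
--         elif cmd == "ENDFUNC":
--             if depth == 0:
--                 return i
--             depth -= 1
--     return len(lines)
-- ===== SOURCE B (Python) =====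
-- def _jump_to_endfunc(lines, start):
--     n = len(lines)
--     i = start
--     while i < n:
--         tokens = lines[i].strip().split()
--         if tokens:
--             cmd = tokens[0]
--             if cmd == "ENDFUNC":
--                 return i
--             if cmd == "FUNC":
--                 # skip the nested block: recurse to find its ENDFUNC, resume after it
--                 i = _jump_to_endfunc(lines, i + 1) + 1
--                 continue
--         i += 1
--     return n
-- ===== Notes on version B (the rewrite author's own statement) =====
-- stated objective: alternative
-- what changed: Replaces the flat scan with an integer depth counter by a recursive block-skipper: on FUNC it recursively finds the nested block's ENDFUNC and resumes one past it, so no depth variable exists.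
import Mathlib
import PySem

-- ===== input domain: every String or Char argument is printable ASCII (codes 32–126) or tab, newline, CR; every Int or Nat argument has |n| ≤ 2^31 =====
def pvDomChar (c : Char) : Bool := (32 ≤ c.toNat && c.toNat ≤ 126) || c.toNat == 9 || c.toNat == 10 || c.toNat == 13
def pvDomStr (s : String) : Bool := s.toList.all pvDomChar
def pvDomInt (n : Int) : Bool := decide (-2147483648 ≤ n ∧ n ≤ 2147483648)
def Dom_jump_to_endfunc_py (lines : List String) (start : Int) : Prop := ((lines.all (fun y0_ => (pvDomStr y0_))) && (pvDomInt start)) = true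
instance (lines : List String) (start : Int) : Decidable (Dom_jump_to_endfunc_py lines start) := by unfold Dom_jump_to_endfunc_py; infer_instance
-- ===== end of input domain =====

-- B replaces A's depth-counter scan by a recursive block-skipper (alternative decomposition, same cost).

-- ===== PORT A =====
-- A's for-loop with early return, as recursion over the index with the depth accumulator.
-- lines[i] is ported as pyGetD with default "": under Pre_ every accessed index is in range.
set_option maxHeartbeats 1000000 in
def jumpAuxA (lines : List String) (n i depth : Int) : Int :=
  if _h : i < n then
    let tokens := PySem.Str.split₀ (PySem.Str.strip (PySem.List.pyGetD lines i ""))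
    if tokens.isEmpty then jumpAuxA lines n (i + 1) depth
    else
      let cmd := tokens.headD ""
      if cmd = "FUNC" then jumpAuxA lines n (i + 1) (depth + 1)
      else if cmd = "ENDFUNC" then
        if depth = 0 then i else jumpAuxA lines n (i + 1) (depth - 1)
      else jumpAuxA lines n (i + 1) depth
  else n
termination_by (n - i).toNat
decreasing_by all_goals omega

def jump_to_endfunc_py (lines : List String) (start : Int) : Int :=
  jumpAuxA lines (lines.length : Int) start 0

-- ===== PORT B =====
-- B's while loop + self-recursion, fused into one fuel-guarded recursion (fuel only makes
-- the same computation total; with the supplied fuel the 0-branch is never reached).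
def jumpAuxB (lines : List String) (n : Int) (fuel : Nat) (i : Int) : Int :=
  match fuel with
  | 0 => n
  | f + 1 =>
    if i < n then
      let tokens := PySem.Str.split₀ (PySem.Str.strip (PySem.List.pyGetD lines i ""))
      if tokens.isEmpty then jumpAuxB lines n f (i + 1)
      else
        let cmd := tokens.headD ""
        if cmd = "ENDFUNC" then i
        else if cmd = "FUNC" then jumpAuxB lines n f (jumpAuxB lines n f (i + 1) + 1)
        else jumpAuxB lines n f (i + 1)
    else n

def jump_to_endfunc_py_alt (lines : List String) (start : Int) : Int :=
  jumpAuxB lines (lines.length : Int) (((lines.length : Int) - start).toNat + 1) start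

-- ===== PRECONDITION & SPEC =====
-- Pre_ excludes exactly the inputs where Python A raises IndexError: start < -len(lines)
-- makes range(start, len) reach an index before -len, so lines[i] raises (B raises there too).
def Pre_jump_to_endfunc_py (lines : List String) (start : Int) : Prop :=
  -(lines.length : Int) ≤ start
instance (lines : List String) (start : Int) : Decidable (Pre_jump_to_endfunc_py lines start) := by
  unfold Pre_jump_to_endfunc_py; infer_instance

def pvWitness_jump_to_endfunc_py : List String × Int := (["FUNC f", "  NOP", "ENDFUNC"], 0)

def Spec_jump_to_endfunc_py (lines : List String) (start : Int) (out : Int) : Prop := out = jump_to_endfunc_py_alt lines start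
instance (lines : List String) (start : Int) (out : Int) : Decidable (Spec_jump_to_endfunc_py lines start out) := by unfold Spec_jump_to_endfunc_py; infer_instance

-- ===== CLAIM (what is proved, stated in full; the proofs are below) =====
def Claim_equal_jump_to_endfunc_py : Prop := ∀ (lines : List String) (start : Int), Dom_jump_to_endfunc_py lines start → Pre_jump_to_endfunc_py lines start → Spec_jump_to_endfunc_py lines start (jump_to_endfunc_py lines start)

-- ===== LEMMAS AND PROOFS =====

-- One-step unfolding lemmas for the two ports (zeta-reduced bodies, easier to rewrite with).
lemma jumpAuxA_neg (lines : List String) (n i depth : Int) (h : ¬ i < n) :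
    jumpAuxA lines n i depth = n := by
  rw [jumpAuxA, dif_neg h]

lemma jumpAuxA_pos (lines : List String) (n i depth : Int) (h : i < n) :
    jumpAuxA lines n i depth =
      if (PySem.Str.split₀ (PySem.Str.strip (PySem.List.pyGetD lines i ""))).isEmpty then
        jumpAuxA lines n (i + 1) depth
      else if (PySem.Str.split₀ (PySem.Str.strip (PySem.List.pyGetD lines i ""))).headD "" = "FUNC" then
        jumpAuxA lines n (i + 1) (depth + 1)
      else if (PySem.Str.split₀ (PySem.Str.strip (PySem.List.pyGetD lines i ""))).headD "" = "ENDFUNC" then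
        if depth = 0 then i else jumpAuxA lines n (i + 1) (depth - 1)
      else jumpAuxA lines n (i + 1) depth := by
  rw [jumpAuxA, dif_pos h]

lemma jumpAuxB_neg (lines : List String) (n : Int) (f : Nat) (i : Int) (h : ¬ i < n) :
    jumpAuxB lines n (f + 1) i = n := by
  rw [jumpAuxB, if_neg h]

lemma jumpAuxB_pos (lines : List String) (n : Int) (f : Nat) (i : Int) (h : i < n) :
    jumpAuxB lines n (f + 1) i =
      if (PySem.Str.split₀ (PySem.Str.strip (PySem.List.pyGetD lines i ""))).isEmpty then
        jumpAuxB lines n f (i + 1)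
      else if (PySem.Str.split₀ (PySem.Str.strip (PySem.List.pyGetD lines i ""))).headD "" = "ENDFUNC" then
        i
      else if (PySem.Str.split₀ (PySem.Str.strip (PySem.List.pyGetD lines i ""))).headD "" = "FUNC" then
        jumpAuxB lines n f (jumpAuxB lines n f (i + 1) + 1)
      else jumpAuxB lines n f (i + 1) := by
  rw [jumpAuxB, if_pos h]

-- A's scanner never returns an index below where it started (when it starts inside the list).
lemma jumpAuxA_ge (lines : List String) (n : Int) :
    ∀ k i depth, (n - i).toNat = k → i ≤ n → i ≤ jumpAuxA lines n i depth := by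
  intro k
  induction k using Nat.strong_induction_on with
  | _ k ih =>
    intro i depth hk hin
    by_cases h : i < n
    · rw [jumpAuxA_pos lines n i depth h]
      have hlt : (n - (i + 1)).toNat < k := by omega
      have hle : i + 1 ≤ n := by omega
      have H : ∀ d, i ≤ jumpAuxA lines n (i + 1) d :=
        fun d => le_trans (by omega) (ih _ hlt (i + 1) d rfl hle)
      set t := PySem.Str.split₀ (PySem.Str.strip (PySem.List.pyGetD lines i "")) with hts
      by_cases h0 : t.isEmpty
      · rw [if_pos h0]; exact H depth
      · rw [if_neg h0]
        by_cases hf : t.headD "" = "FUNC"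
        · rw [if_pos hf]; exact H (depth + 1)
        · rw [if_neg hf]
          by_cases he : t.headD "" = "ENDFUNC"
          · rw [if_pos he]
            by_cases hd : depth = 0
            · rw [if_pos hd]
            · rw [if_neg hd]; exact H (depth - 1)
          · rw [if_neg he]; exact H depth
    · rw [jumpAuxA_neg lines n i depth h]; omega

-- Key structural lemma: scanning with depth d+1 equals skipping one matched block
-- (found by a depth-0 scan) and continuing with depth d.
lemma jumpAuxA_succ (lines : List String) (n : Int) :
    ∀ k i d, (n - i).toNat = k → i ≤ n → 0 ≤ d →
      jumpAuxA lines n i (d + 1) = jumpAuxA lines n (jumpAuxA lines n i 0 + 1) d := by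
  intro k
  induction k using Nat.strong_induction_on with
  | _ k ih =>
    intro i d hk hin hd
    by_cases h : i < n
    · have hlt : (n - (i + 1)).toNat < k := by omega
      have hle : i + 1 ≤ n := by omega
      rw [jumpAuxA_pos lines n i (d + 1) h, jumpAuxA_pos lines n i 0 h]
      set t := PySem.Str.split₀ (PySem.Str.strip (PySem.List.pyGetD lines i "")) with hts
      by_cases h0 : t.isEmpty
      · rw [if_pos h0, if_pos h0]; exact ih _ hlt (i + 1) d rfl hle hd
      · rw [if_neg h0, if_neg h0]
        by_cases hf : t.headD "" = "FUNC"
        · rw [if_pos hf, if_pos hf]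
          set j := jumpAuxA lines n (i + 1) 0 with hj
          clear_value j
          have hge : i + 1 ≤ j := by rw [hj]; exact jumpAuxA_ge lines n _ (i + 1) 0 rfl hle
          have h1 : jumpAuxA lines n (i + 1) (0 + 1) = jumpAuxA lines n (j + 1) 0 := by
            rw [hj]; exact ih _ hlt (i + 1) 0 rfl hle (by omega)
          have h2 : jumpAuxA lines n (i + 1) (d + 1 + 1) = jumpAuxA lines n (j + 1) (d + 1) := by
            rw [hj]; exact ih _ hlt (i + 1) (d + 1) rfl hle (by omega)
          rw [h2, h1]
          by_cases hjn : j < n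
          · exact ih ((n - (j + 1)).toNat) (by omega) (j + 1) d rfl (by omega) hd
          · have e1 : jumpAuxA lines n (j + 1) (d + 1) = n :=
              jumpAuxA_neg lines n (j + 1) (d + 1) (by omega)
            have e2 : jumpAuxA lines n (j + 1) 0 = n :=
              jumpAuxA_neg lines n (j + 1) 0 (by omega)
            have e3 : jumpAuxA lines n (n + 1) d = n :=
              jumpAuxA_neg lines n (n + 1) d (show ¬ (n + 1 : Int) < n by omega)
            rw [e1, e2, e3]
        · rw [if_neg hf, if_neg hf]
          by_cases he : t.headD "" = "ENDFUNC"
          · rw [if_pos he, if_pos he, if_pos rfl, if_neg (show (d : Int) + 1 ≠ 0 by omega)]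
            norm_num
          · rw [if_neg he, if_neg he]
            exact ih _ hlt (i + 1) d rfl hle hd
    · have e0 : jumpAuxA lines n i (d + 1) = n := jumpAuxA_neg lines n i (d + 1) h
      have e1 : jumpAuxA lines n i 0 = n := jumpAuxA_neg lines n i 0 h
      have e2 : jumpAuxA lines n (n + 1) d = n :=
        jumpAuxA_neg lines n (n + 1) d (show ¬ (n + 1 : Int) < n by omega)
      rw [e0, e1, e2]

-- B's fuel-guarded recursion computes A's depth-0 scan whenever the fuel suffices.
lemma jumpAuxB_eq (lines : List String) (n : Int) :
    ∀ fuel i, (n - i).toNat + 1 ≤ fuel →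
      jumpAuxB lines n fuel i = jumpAuxA lines n i 0 := by
  intro fuel
  induction fuel with
  | zero => intro i h; omega
  | succ f ihf =>
    intro i hfl
    by_cases h : i < n
    · rw [jumpAuxB_pos lines n f i h, jumpAuxA_pos lines n i 0 h]
      have hle : i + 1 ≤ n := by omega
      have hrec : (n - (i + 1)).toNat + 1 ≤ f := by omega
      set t := PySem.Str.split₀ (PySem.Str.strip (PySem.List.pyGetD lines i "")) with hts
      by_cases h0 : t.isEmpty
      · rw [if_pos h0, if_pos h0]; exact ihf (i + 1) hrec
      · rw [if_neg h0, if_neg h0]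
        by_cases hf : t.headD "" = "FUNC"
        · rw [if_neg (show t.headD "" ≠ "ENDFUNC" by rw [hf]; decide), if_pos hf, if_pos hf]
          set j := jumpAuxA lines n (i + 1) 0 with hj
          clear_value j
          have h1 : jumpAuxB lines n f (i + 1) = j := by rw [hj]; exact ihf (i + 1) hrec
          have hge : i + 1 ≤ j := by rw [hj]; exact jumpAuxA_ge lines n _ (i + 1) 0 rfl hle
          have h2 : jumpAuxB lines n f (j + 1) = jumpAuxA lines n (j + 1) 0 :=
            ihf (j + 1) (by omega)
          have ihA := jumpAuxA_succ lines n ((n - (i + 1)).toNat)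
          rw [h1] at *
          rw [h2]
          have h3 : jumpAuxA lines n (j + 1) 0 = jumpAuxA lines n (i + 1) (0 + 1) := by
            rw [hj]; exact (ihA (i + 1) 0 rfl hle (le_refl 0)).symm
          exact h3
        · by_cases he : t.headD "" = "ENDFUNC"
          · rw [if_pos he, if_neg hf, if_pos he, if_pos rfl]
          · rw [if_neg he, if_neg he, if_neg hf, if_neg hf]
            exact ihf (i + 1) hrec
    · rw [jumpAuxB_neg lines n f i h, jumpAuxA_neg lines n i 0 h]

-- ===== VERDICT (by name: the statement is the Claim_ definition above) =====
theorem jump_to_endfunc_py_spec : Claim_equal_jump_to_endfunc_py := by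
  intro lines start _hDom _hPre
  unfold Spec_jump_to_endfunc_py jump_to_endfunc_py jump_to_endfunc_py_alt
  exact (jumpAuxB_eq lines (lines.length : Int) _ start (by omega)).symm
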